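-- pv_equiv track=rewrite | github.com/CryptoPlazaHQ/Maverick | maverick_bot.py | _combine_responses
-- ===== SOURCE A (Python) =====
-- from typing import Dict, List, Optional, Any, Tuple, Callable
--
-- def _combine_responses(responses: List[str]) -> str:
--     """
--     Combine multiple analysis responses intelligently
--
--     Args:
--         responses: List of response strings from Claude
--
--     Returns:
--         Combined and formatted response string
--     """
--     sections = {
--         "Pattern Recognition": [],
--         "Multi-timeframe Analysis": [],
--         "Setup Classification": [],
--         "Risk Assessment": []
--     }
--
--     for response in responses:
--         current_section = None
--
--         for line in response.split('\n'):
--             line = line.strip()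
--             if not line:
--                 continue
--
--             # Detect section headers
--             for section in sections.keys():
--                 if section in line:
--                     current_section = section
--                     break
--
--             # Add content to appropriate section
--             if current_section and line not in sections[current_section]:
--                 sections[current_section].append(line)
--
--     # Combine sections
--     combined = []
--     for section, content in sections.items():
--         if content:
--             combined.append(f"\n{section}:")
--             combined.extend(content)
--
--     return "\n".join(combined)
-- ===== SOURCE B (Python) =====
-- def _combine_responses(responses):
--     """
--     Combine multiple analysis responses intelligently.
--
--     Two-phase rewrite: phase 1 collects every matching line into one flat
--     tagged stream (duplicates included); phase 2 filters per section,
--     deduplicates with dict.fromkeys (first occurrence wins) and assembles.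
--     """
--     names = ["Pattern Recognition", "Multi-timeframe Analysis",
--              "Setup Classification", "Risk Assessment"]
--
--     tagged = []  # flat stream of (section index, line), duplicates kept
--     for response in responses:
--         current = None
--         for raw in response.split('\n'):
--             line = raw.strip()
--             if not line:
--                 continue
--             for i, name in enumerate(names):
--                 if name in line:
--                     current = i
--                     break
--             if current is not None:
--                 tagged.append((current, line))
--
--     parts = []
--     for i, name in enumerate(names):
--         content = list(dict.fromkeys(line for sec, line in tagged if sec == i))
--         if content:
--             parts.append("\n" + name + ":")
--             parts.extend(content)
--     return "\n".join(parts)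
-- ===== Notes on version B (the rewrite author's own statement) =====
-- stated objective: alternative
-- what changed: A deduplicates inline while scanning (membership check against each growing per-section list inside the scan); B splits the work into a collect phase that emits one flat tagged (section, line) stream with duplicates kept, and a separate assemble phase that filters per section and deduplicates once with dict.fromkeys.
import Mathlib
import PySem

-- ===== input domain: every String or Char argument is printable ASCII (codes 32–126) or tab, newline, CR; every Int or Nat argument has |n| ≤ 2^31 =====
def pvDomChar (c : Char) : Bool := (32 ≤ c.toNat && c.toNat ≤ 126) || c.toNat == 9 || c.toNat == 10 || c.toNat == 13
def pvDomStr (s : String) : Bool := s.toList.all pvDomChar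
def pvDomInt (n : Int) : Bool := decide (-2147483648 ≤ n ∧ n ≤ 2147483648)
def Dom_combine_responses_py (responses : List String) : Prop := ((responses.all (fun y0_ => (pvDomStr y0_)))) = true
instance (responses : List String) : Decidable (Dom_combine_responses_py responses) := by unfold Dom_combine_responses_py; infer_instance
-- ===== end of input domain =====

-- B restructures A's single dedup-inline scan into a collect phase (flat tagged stream,
-- duplicates kept) plus a separate per-section dedup/assemble phase; same return value, no speed claim.

-- The fixed section keys, as an enum (the dict in A has exactly these four keys, in this order).
inductive pvSec : Type
  | s0 | s1 | s2 | s3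
deriving DecidableEq, Repr

-- response.split('\n'): split? is none only for sep = "", so getD never fires (totality guard)
def pvSplit (s : String) : List String := (PySem.Str.split? s "\n").getD []

-- 'for section in sections.keys(): if section in line: current_section = section; break'
-- (identical header-detection loop in both Pythons; keys in dict insertion order)
def pvDetect (cur : Option pvSec) (line : String) : Option pvSec :=
  if PySem.Str.isIn "Pattern Recognition" line then some pvSec.s0
  else if PySem.Str.isIn "Multi-timeframe Analysis" line then some pvSec.s1
  else if PySem.Str.isIn "Setup Classification" line then some pvSec.s2
  else if PySem.Str.isIn "Risk Assessment" line then some pvSec.s3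
  else cur

-- 'if content: combined.append(f"\n{section}:"); combined.extend(content)' (same in both Pythons)
def pvBlock (header : String) (content : List String) : List String :=
  if content = [] then [] else header :: content

-- ===== PORT A =====
-- sections dict with the four fixed keys = quadruple of its value lists, in key order
abbrev pvQ : Type := List String × List String × List String × List String

-- 'if current_section and line not in sections[current_section]: sections[current_section].append(line)'
def pvUpdA (q : pvQ) (i : pvSec) (line : String) : pvQ :=
  match i with
  | pvSec.s0 => (if line ∈ q.1 then q.1 else q.1 ++ [line], q.2.1, q.2.2.1, q.2.2.2)
  | pvSec.s1 => (q.1, if line ∈ q.2.1 then q.2.1 else q.2.1 ++ [line], q.2.2.1, q.2.2.2)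
  | pvSec.s2 => (q.1, q.2.1, if line ∈ q.2.2.1 then q.2.2.1 else q.2.2.1 ++ [line], q.2.2.2)
  | pvSec.s3 => (q.1, q.2.1, q.2.2.1, if line ∈ q.2.2.2 then q.2.2.2 else q.2.2.2 ++ [line])

-- body of A's 'for line in response.split('\n')' loop; state = (current_section, sections)
def pvStepA (st : Option pvSec × pvQ) (raw : String) : Option pvSec × pvQ :=
  let line := PySem.Str.strip raw
  if line = "" then st
  else
    match pvDetect st.1 line with
    | none => (none, st.2)
    | some i => (some i, pvUpdA st.2 i line)

-- body of A's outer 'for response in responses' loop (current_section reset to None)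
def pvRespA (secs : pvQ) (response : String) : pvQ :=
  ((pvSplit response).foldl pvStepA (none, secs)).2

-- A's final combine loop over sections.items() ("\n{section}:" headers, in key order)
def pvOutA (s : pvQ) : String :=
  PySem.Str.join "\n"
    (pvBlock "\nPattern Recognition:" s.1 ++ pvBlock "\nMulti-timeframe Analysis:" s.2.1 ++
     pvBlock "\nSetup Classification:" s.2.2.1 ++ pvBlock "\nRisk Assessment:" s.2.2.2)

def combine_responses_py (responses : List String) : String :=
  pvOutA (responses.foldl pvRespA (([], [], [], []) : pvQ))

-- ===== PORT B =====
-- body of B's inner loop: append (section index, line) to the flat tagged stream, duplicates kept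
def pvStepB (st : Option pvSec × List (pvSec × String)) (raw : String) :
    Option pvSec × List (pvSec × String) :=
  let line := PySem.Str.strip raw
  if line = "" then st
  else
    match pvDetect st.1 line with
    | none => (none, st.2)
    | some i => (some i, st.2 ++ [(i, line)])

-- body of B's outer 'for response in responses' loop
def pvRespB (acc : List (pvSec × String)) (response : String) : List (pvSec × String) :=
  ((pvSplit response).foldl pvStepB (none, acc)).2

-- 'list(dict.fromkeys(line for sec, line in tagged if sec == i))'
def pvContent (tagged : List (pvSec × String)) (i : pvSec) : List String :=
  PySem.List.dedup ((tagged.filter (fun p => p.1 = i)).map (·.2))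

-- B's assemble loop over enumerate(names)
def pvOutB (tagged : List (pvSec × String)) : String :=
  PySem.Str.join "\n"
    (pvBlock "\nPattern Recognition:" (pvContent tagged pvSec.s0) ++
     pvBlock "\nMulti-timeframe Analysis:" (pvContent tagged pvSec.s1) ++
     pvBlock "\nSetup Classification:" (pvContent tagged pvSec.s2) ++
     pvBlock "\nRisk Assessment:" (pvContent tagged pvSec.s3))

def combine_responses_py_alt (responses : List String) : String :=
  pvOutB (responses.foldl pvRespB ([] : List (pvSec × String)))

-- ===== PRECONDITION & SPEC =====
def Spec_combine_responses_py (responses : List String) (out : String) : Prop := out = combine_responses_py_alt responses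
instance (responses : List String) (out : String) : Decidable (Spec_combine_responses_py responses out) := by unfold Spec_combine_responses_py; infer_instance

-- ===== CLAIM (what is proved, stated in full; the proofs are below) =====
def Claim_equal_combine_responses_py : Prop := ∀ (responses : List String), Dom_combine_responses_py responses → Spec_combine_responses_py responses (combine_responses_py responses)

-- ===== LEMMAS AND PROOFS =====

-- invariant: A's per-section list equals the dedup of B's tagged stream filtered to that section
def pvRel (q : pvQ) (t : List (pvSec × String)) : Prop :=
  q.1 = pvContent t pvSec.s0 ∧ q.2.1 = pvContent t pvSec.s1 ∧
  q.2.2.1 = pvContent t pvSec.s2 ∧ q.2.2.2 = pvContent t pvSec.s3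

lemma pvDedup_snoc (xs : List String) (l : String) :
    PySem.List.dedup (xs ++ [l]) =
      if l ∈ PySem.List.dedup xs then PySem.List.dedup xs else PySem.List.dedup xs ++ [l] := by
  rw [PySem.List.dedup_eq_ofList, PySem.List.dedup_eq_ofList, PySem.Set.ofList_eq_foldl,
    PySem.Set.ofList_eq_foldl, List.foldl_append]
  simp [PySem.Set.add, PySem.Set.contains_eq_listContains]

lemma pvContent_snoc (t : List (pvSec × String)) (j i : pvSec) (l : String) :
    pvContent (t ++ [(j, l)]) i =
      if j = i then
        (if l ∈ pvContent t i then pvContent t i else pvContent t i ++ [l])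
      else pvContent t i := by
  by_cases h : j = i
  · subst h
    rw [if_pos rfl]
    unfold pvContent
    rw [List.filter_append,
      show List.filter (fun p => decide (p.1 = j)) [(j, l)] = [(j, l)] from by simp,
      List.map_append]
    exact pvDedup_snoc _ _
  · rw [if_neg h]
    unfold pvContent
    rw [List.filter_append,
      show List.filter (fun p => decide (p.1 = i)) [(j, l)] = [] from by simp [h]]
    simp

lemma pvStep_rel (raw : String) (stA : Option pvSec × pvQ) (stB : Option pvSec × List (pvSec × String))
    (hc : stA.1 = stB.1) (h : pvRel stA.2 stB.2) :
    (pvStepA stA raw).1 = (pvStepB stB raw).1 ∧ pvRel (pvStepA stA raw).2 (pvStepB stB raw).2 := by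
  obtain ⟨h0, h1, h2, h3⟩ := h
  unfold pvStepA pvStepB
  by_cases he : PySem.Str.strip raw = ""
  · simp only [he, if_pos]
    exact ⟨hc, h0, h1, h2, h3⟩
  · simp only [he, if_false]
    rw [hc]
    cases hd : pvDetect stB.1 (PySem.Str.strip raw) with
    | none => exact ⟨rfl, h0, h1, h2, h3⟩
    | some i =>
      refine ⟨rfl, ?_⟩
      cases i <;>
        exact ⟨by simp [pvUpdA, pvContent_snoc, h0, h1, h2, h3],
               by simp [pvUpdA, pvContent_snoc, h0, h1, h2, h3],
               by simp [pvUpdA, pvContent_snoc, h0, h1, h2, h3],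
               by simp [pvUpdA, pvContent_snoc, h0, h1, h2, h3]⟩

lemma pvLines_rel (raws : List String) :
    ∀ (stA : Option pvSec × pvQ) (stB : Option pvSec × List (pvSec × String)),
      stA.1 = stB.1 → pvRel stA.2 stB.2 →
      (raws.foldl pvStepA stA).1 = (raws.foldl pvStepB stB).1 ∧
        pvRel (raws.foldl pvStepA stA).2 (raws.foldl pvStepB stB).2 := by
  induction raws with
  | nil => intro stA stB hc h; exact ⟨hc, h⟩
  | cons raw rest ih =>
    intro stA stB hc h
    obtain ⟨hc', h'⟩ := pvStep_rel raw stA stB hc h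
    exact ih _ _ hc' h'

lemma pvResp_rel (rs : List String) :
    ∀ (q : pvQ) (t : List (pvSec × String)), pvRel q t →
      pvRel (rs.foldl pvRespA q) (rs.foldl pvRespB t) := by
  induction rs with
  | nil => intro q t h; exact h
  | cons r rest ih =>
    intro q t h
    exact ih _ _ (pvLines_rel (pvSplit r) (none, q) (none, t) rfl h).2

-- ===== VERDICT (by name: the statement is the Claim_ definition above) =====
theorem combine_responses_py_spec : Claim_equal_combine_responses_py := by
  intro responses _
  unfold Spec_combine_responses_py combine_responses_py combine_responses_py_alt
  have h0 : pvRel (([], [], [], []) : pvQ) ([] : List (pvSec × String)) :=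
    ⟨rfl, rfl, rfl, rfl⟩
  obtain ⟨e0, e1, e2, e3⟩ := pvResp_rel responses _ _ h0
  unfold pvOutA pvOutB
  rw [e0, e1, e2, e3]
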